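-- pv_equiv track=rewrite | github.com/VirtualExecutive/TrendyolMap | miner.py | isMagazaUrl
-- ===== SOURCE A (Python) =====
-- def isMagazaUrl(url):
--     if url.endswith("?sst=0"):
--         url = url[:url.index("?")]
--     numbers="0123456789"
--     if url[-1] not in numbers:
--         return False
--
--     mode=0
--     for char in url[::-1]:
--
--         if mode==0:
--
--             if char in numbers:
--                 continue
--             elif char == "-":
--                 mode=1
--                 continue
--             else:
--                 return False
--
--         elif mode==1:
--             if char =="m":
--                 mode=2
--                 continue
--             else:
--                 return False
--
--         elif mode==2:
--             if char =="-":
--                 return True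
--             else:
--                 return False
--
--         else:
--             return False
--     return False
-- ===== SOURCE B (Python) =====
-- def isMagazaUrl(url):
--     if url.endswith("?sst=0"):
--         url = url[:url.index("?")]
--     numbers = "0123456789"
--     if url[-1] not in numbers:
--         return False
--     return url.rstrip(numbers).endswith("-m-")
-- ===== Notes on version B (the rewrite author's own statement) =====
-- stated objective: simpler
-- what changed: Replaced the hand-written mode-0/1/2 state machine over the reversed string with stripping the trailing digit run (rstrip) and a single endswith("-m-") check, keeping the ?sst=0 stripping and the url[-1] digit guard.
import Mathlib
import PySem

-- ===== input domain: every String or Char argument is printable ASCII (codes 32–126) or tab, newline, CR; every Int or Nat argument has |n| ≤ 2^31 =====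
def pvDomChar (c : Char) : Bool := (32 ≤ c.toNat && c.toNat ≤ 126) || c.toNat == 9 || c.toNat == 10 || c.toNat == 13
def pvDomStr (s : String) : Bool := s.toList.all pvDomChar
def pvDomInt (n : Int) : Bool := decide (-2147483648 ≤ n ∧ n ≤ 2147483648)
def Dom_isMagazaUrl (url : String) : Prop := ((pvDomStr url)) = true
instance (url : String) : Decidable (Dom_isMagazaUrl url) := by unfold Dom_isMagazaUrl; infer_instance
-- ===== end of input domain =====

-- B replaces A's reversed-string state machine by stripping the trailing digit run and
-- checking that what remains ends with "-m-" (objective: simpler).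

-- the digit set "0123456789" shared by both sources
def pvNumbers : List Char := ['0','1','2','3','4','5','6','7','8','9']

-- ===== PORT A =====
-- the `for char in url[::-1]` loop with its `mode` state, as structural recursion over the
-- reversed character list (url[::-1] is the reverse: PySem.List.slice?_none_none_neg_one)
def isMagazaUrlDfa : List Char → Nat → Bool
  | [], _ => false                                  -- loop exhausted: `return False`
  | c :: rest, mode =>
    if mode = 0 then
      if pvNumbers.contains c then isMagazaUrlDfa rest 0
      else if c = '-' then isMagazaUrlDfa rest 1
      else false
    else if mode = 1 then
      if c = 'm' then isMagazaUrlDfa rest 2 else false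
    else if mode = 2 then
      decide (c = '-')                              -- return True / return False
    else false

def isMagazaUrl (url : String) : Bool :=
  -- url.index("?"): the guard guarantees "?" occurs, so index = find
  let url := if PySem.Str.endswith url "?sst=0" then
      PySem.Str.slice url none (some (PySem.Str.find url "?"))
    else url
  match PySem.Str.pyGet? url (-1) with
  | none => false                                   -- Python raises IndexError here (excluded by Pre_)
  | some c =>
    -- `url[-1] not in numbers`: membership of a single char = list membership (exact)
    if ! pvNumbers.contains c then false
    else isMagazaUrlDfa url.toList.reverse 0

-- ===== PORT B =====
def isMagazaUrl_alt (url : String) : Bool :=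
  let url := if PySem.Str.endswith url "?sst=0" then
      PySem.Str.slice url none (some (PySem.Str.find url "?"))
    else url
  match PySem.Str.pyGet? url (-1) with
  | none => false                                   -- Python raises IndexError here (excluded by Pre_)
  | some c =>
    if ! pvNumbers.contains c then false
    else
      -- url.rstrip("0123456789"): drop the trailing run of digit chars (exact: ASCII, one char per code point)
      let stripped := (url.toList.reverse.dropWhile pvNumbers.contains).reverse
      PySem.Chars.endswith stripped ['-', 'm', '-']

-- ===== PRECONDITION & SPEC =====
-- Pre_ excludes exactly the inputs where A raises IndexError on url[-1]: the empty string, and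
-- strings ending in "?sst=0" whose first character is '?' (the stripped prefix is then empty).
def Pre_isMagazaUrl (url : String) : Prop :=
  url ≠ "" ∧ ¬ (PySem.Str.endswith url "?sst=0" = true ∧ PySem.Str.startswith url "?" = true)
instance (url : String) : Decidable (Pre_isMagazaUrl url) := by unfold Pre_isMagazaUrl; infer_instance

def pvWitness_isMagazaUrl : String := "abc-m-123"

def Spec_isMagazaUrl (url : String) (out : Bool) : Prop := out = isMagazaUrl_alt url
instance (url : String) (out : Bool) : Decidable (Spec_isMagazaUrl url out) := by unfold Spec_isMagazaUrl; infer_instance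

-- ===== CLAIM (what is proved, stated in full; the proofs are below) =====
def Claim_equal_isMagazaUrl : Prop := ∀ (url : String), Dom_isMagazaUrl url → Pre_isMagazaUrl url → Spec_isMagazaUrl url (isMagazaUrl url)

-- ===== LEMMAS AND PROOFS =====

lemma dfa2_eq (r : List Char) : isMagazaUrlDfa r 2 = decide (r.take 1 = ['-']) := by
  cases r with
  | nil => rfl
  | cons c rest => simp [isMagazaUrlDfa]

lemma dfa1_eq (r : List Char) : isMagazaUrlDfa r 1 = decide (r.take 2 = ['m', '-']) := by
  cases r with
  | nil => rfl
  | cons c rest =>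
    by_cases hc : c = 'm'
    · subst hc; simp [isMagazaUrlDfa, dfa2_eq]
    · simp [isMagazaUrlDfa, hc]

lemma dfa0_eq (r : List Char) :
    isMagazaUrlDfa r 0 = decide ((r.dropWhile pvNumbers.contains).take 3 = ['-', 'm', '-']) := by
  induction r with
  | nil => rfl
  | cons c rest ih =>
    by_cases hd : c ∈ pvNumbers
    · simp [isMagazaUrlDfa, hd, ih]
    · by_cases hc : c = '-'
      · subst hc
        simp [isMagazaUrlDfa, dfa1_eq, (by decide : ('-' : Char) ∉ pvNumbers)]
      · simp [isMagazaUrlDfa, hd, hc, List.take_succ_cons]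

lemma endswith_rev (t : List Char) :
    PySem.Chars.endswith t.reverse ['-', 'm', '-'] = decide (t.take 3 = ['-', 'm', '-']) := by
  rw [Bool.eq_iff_iff, PySem.Chars.endswith_iff, decide_eq_true_iff]
  constructor
  · intro h
    have h' : ['-', 'm', '-'] <+: t := by
      have := List.reverse_prefix.mpr h
      simpa using this
    obtain ⟨s, hs⟩ := h'
    simp [← hs]
  · intro h
    have h' : ['-', 'm', '-'] <+: t := h ▸ List.take_prefix 3 t
    have := List.reverse_suffix.mpr h'
    simpa using this

lemma ports_agree (url : String) : isMagazaUrl url = isMagazaUrl_alt url := by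
  unfold isMagazaUrl isMagazaUrl_alt
  dsimp only
  generalize (if PySem.Str.endswith url "?sst=0" = true then
      PySem.Str.slice url none (some (PySem.Str.find url "?")) else url) = u
  cases h : PySem.Str.pyGet? u (-1) with
  | none => rfl
  | some c =>
    by_cases hm : c ∈ pvNumbers
    · simp only [List.contains_eq_mem, hm, decide_true, Bool.not_true, Bool.false_eq_true,
        if_false]
      rw [dfa0_eq, endswith_rev]
    · simp [hm]

-- ===== VERDICT (by name: the statement is the Claim_ definition above) =====
theorem isMagazaUrl_spec : Claim_equal_isMagazaUrl := by
  intro url _ _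
  unfold Spec_isMagazaUrl
  exact ports_agree url
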